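-- pv_equiv track=rewrite | github.com/MarkZhao99/photogallery | app.py | collage_column_heights
-- ===== SOURCE A (Python) =====
-- COLLAGE_COLUMNS = 4
--
-- def collage_column_heights(occupied: list[list[bool]], columns: int = COLLAGE_COLUMNS) -> list[int]:
--     heights: list[int] = []
--     for column in range(columns):
--         max_height = 0
--         for row_index, row in enumerate(occupied):
--             if row[column]:
--                 max_height = row_index + 1
--         heights.append(max_height)
--     return heights
-- ===== SOURCE B (Python) =====
-- COLLAGE_COLUMNS = 4
--
-- def collage_column_heights(occupied: list[list[bool]], columns: int = COLLAGE_COLUMNS) -> list[int]: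
--     numbered = list(enumerate(occupied))
--     numbered.reverse()
--     return [next((i + 1 for i, row in numbered if row[col]), 0)
--             for col in range(columns)]
-- ===== Notes on version B (the rewrite author's own statement) =====
-- stated objective: alternative
-- what changed: Instead of scanning every row per column and keeping the last occupied index, B scans the enumerated rows once reversed and takes the first occupied row from the bottom (early-terminating next(...) with default 0), building the result as a comprehension.
import Mathlib
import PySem

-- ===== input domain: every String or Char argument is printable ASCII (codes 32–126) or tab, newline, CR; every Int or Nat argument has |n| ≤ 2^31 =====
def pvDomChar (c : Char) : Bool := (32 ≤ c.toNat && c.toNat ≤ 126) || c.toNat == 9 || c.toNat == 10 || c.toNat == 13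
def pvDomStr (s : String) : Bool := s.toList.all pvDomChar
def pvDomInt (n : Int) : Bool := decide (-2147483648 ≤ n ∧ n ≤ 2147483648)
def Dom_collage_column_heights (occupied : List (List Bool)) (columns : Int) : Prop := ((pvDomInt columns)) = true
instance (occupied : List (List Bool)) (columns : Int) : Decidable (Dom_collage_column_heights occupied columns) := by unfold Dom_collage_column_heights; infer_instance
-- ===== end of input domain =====

-- B replaces A's full accumulating scan of all rows per column with a bottom-up
-- first-match search (reversed enumerate + early exit, default 0): an alternative
-- decomposition, same asymptotic cost.

-- ===== PORT A =====
-- row[column] is ported as pyGetD … false: exact under Pre_ (every row has length ≥ columns).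
def collage_column_heights (occupied : List (List Bool)) (columns : Int) : List Int :=
  (PySem.List.pyRange 0 columns 1).foldl
    (fun heights column =>
      heights ++ [(PySem.List.enumerate occupied).foldl
        (fun max_height p => if PySem.List.pyGetD p.2 column false then p.1 + 1 else max_height) 0])
    []

-- ===== PORT B =====
-- the next(… , 0) over the reversed enumerated rows: first occupied row from the bottom, else 0.
def pvBottomFind (l : List (Int × List Bool)) (column : Int) : Int :=
  match l with
  | [] => 0
  | p :: rest => if PySem.List.pyGetD p.2 column false then p.1 + 1 else pvBottomFind rest column

def collage_column_heights_alt (occupied : List (List Bool)) (columns : Int) : List Int :=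
  (PySem.List.pyRange 0 columns 1).map
    (fun col => pvBottomFind (PySem.List.enumerate occupied).reverse col)

-- ===== PRECONDITION & SPEC =====
-- Pre_ excludes exactly the inputs where Python A raises IndexError: some row shorter
-- than a column index scanned (rows shorter than `columns`, when columns > 0).
def Pre_collage_column_heights (occupied : List (List Bool)) (columns : Int) : Prop :=
  ∀ row ∈ occupied, columns ≤ (row.length : Int)
instance (occupied : List (List Bool)) (columns : Int) : Decidable (Pre_collage_column_heights occupied columns) := by unfold Pre_collage_column_heights; infer_instance

def pvWitness_collage_column_heights : List (List Bool) × Int :=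
  ([[true, false], [false, true], [false, false]], 2)

def Spec_collage_column_heights (occupied : List (List Bool)) (columns : Int) (out : List Int) : Prop := out = collage_column_heights_alt occupied columns
instance (occupied : List (List Bool)) (columns : Int) (out : List Int) : Decidable (Spec_collage_column_heights occupied columns out) := by unfold Spec_collage_column_heights; infer_instance

-- ===== CLAIM (what is proved, stated in full; the proofs are below) =====
def Claim_equal_collage_column_heights : Prop := ∀ (occupied : List (List Bool)) (columns : Int), Dom_collage_column_heights occupied columns → Pre_collage_column_heights occupied columns → Spec_collage_column_heights occupied columns (collage_column_heights occupied columns)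

-- ===== LEMMAS AND PROOFS =====

-- the last-match accumulating fold equals the first match of the reversed list
theorem pv_foldl_eq_bottomFind (l : List (Int × List Bool)) (column : Int) :
    l.foldl (fun max_height p => if PySem.List.pyGetD p.2 column false then p.1 + 1 else max_height) 0
      = pvBottomFind l.reverse column := by
  induction l using List.reverseRecOn with
  | nil => rfl
  | append_singleton l' p ih =>
    rw [List.foldl_append, List.reverse_append]
    simp only [List.foldl_cons, List.foldl_nil, List.reverse_singleton, List.singleton_append,
      pvBottomFind]
    split <;> simp [ih]

-- ===== VERDICT (by name: the statement is the Claim_ definition above) =====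
theorem collage_column_heights_spec : Claim_equal_collage_column_heights := by
  intro occupied columns _ _
  unfold Spec_collage_column_heights collage_column_heights collage_column_heights_alt
  rw [PySem.List.foldl_append_singleton_eq_map, List.nil_append]
  exact List.map_congr_left (fun col _ => pv_foldl_eq_bottomFind _ col)
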